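-- pv_equiv track=rewrite | github.com/kissy2/Carbon-Bot | 2oldutils.py | func
-- ===== SOURCE A (Python) =====
-- def func(cells,flat):
-- 	ret={'n':[],'s':[],'w':[],'e':[]}
-- 	for c in cells:
-- 		if flat[c] in (3,4,10):
-- 			ret['n'].append(c)
-- 		elif flat[c] in (7,8,6):
-- 			ret['s'].append(c)
-- 		elif flat[c] in (9,8,10):
-- 			ret['w'].append(c)
-- 		elif flat[c] in (5,4,6):
-- 			ret['e'].append(c)
-- 	return ret
-- ===== SOURCE B (Python) =====
-- def func(cells, flat):
--     # Four staged passes, one per direction: the effective value sets after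
--     # the elif priority are disjoint (n:3,4,10; s:7,8,6; w:9; e:5), so each
--     # direction's list is an independent filter of cells.
--     def pick(vals):
--         return [c for c in cells if flat[c] in vals]
--     return {'n': pick((3, 4, 10)),
--             's': pick((7, 8, 6)),
--             'w': pick((9,)),
--             'e': pick((5,))}
-- ===== Notes on version B (the rewrite author's own statement) =====
-- stated objective: alternative
-- what changed: Instead of one pass that dispatches each cell into a mutable four-bucket accumulator, B makes four independent filter passes, one per direction, using the disjoint effective value sets left by the elif priority (w is just {9}, e just {5}).
import Mathlib
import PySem

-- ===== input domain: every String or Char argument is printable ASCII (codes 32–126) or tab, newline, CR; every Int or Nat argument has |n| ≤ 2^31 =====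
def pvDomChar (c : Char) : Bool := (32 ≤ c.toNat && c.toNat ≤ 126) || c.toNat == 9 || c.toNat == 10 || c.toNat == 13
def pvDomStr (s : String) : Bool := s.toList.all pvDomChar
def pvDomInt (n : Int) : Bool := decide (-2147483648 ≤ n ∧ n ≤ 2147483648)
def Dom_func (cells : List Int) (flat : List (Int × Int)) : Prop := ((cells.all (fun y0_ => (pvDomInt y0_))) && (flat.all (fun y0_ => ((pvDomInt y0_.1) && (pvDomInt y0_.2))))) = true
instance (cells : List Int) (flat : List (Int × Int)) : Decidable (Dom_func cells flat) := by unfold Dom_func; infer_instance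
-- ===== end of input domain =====

-- B replaces A's single accumulator pass (four mutable buckets, if/elif dispatch) by four
-- independent filter passes over cells, one per direction, using the disjoint effective
-- value sets left by the elif priority (objective: alternative decomposition, same cost).

-- ===== PORT A =====
-- flat[c]: dict lookup; `none` = KeyError, excluded by Pre_func (the loop then skips, outside Pre_).
def funcStepA (fd : PySem.Dict Int Int) (ret : PySem.Dict String (List Int)) (c : Int) :
    PySem.Dict String (List Int) :=
  match fd.get? c with
  | none => ret
  | some v =>
    if v = 3 ∨ v = 4 ∨ v = 10 then ret.modify "n" [] (· ++ [c])
    else if v = 7 ∨ v = 8 ∨ v = 6 then ret.modify "s" [] (· ++ [c])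
    else if v = 9 ∨ v = 8 ∨ v = 10 then ret.modify "w" [] (· ++ [c])
    else if v = 5 ∨ v = 4 ∨ v = 6 then ret.modify "e" [] (· ++ [c])
    else ret

def func (cells : List Int) (flat : List (Int × Int)) : List (String × List Int) :=
  (cells.foldl (funcStepA (PySem.Dict.ofList flat))
    (((((PySem.Dict.empty.insert "n" []).insert "s" []).insert "w" []).insert "e" []))).items

-- ===== PORT B =====
-- Source B's helper `pick`: one filter pass over cells keeping cells whose flat value is in vals.
def funcPick (cells : List Int) (fd : PySem.Dict Int Int) (vals : List Int) : List Int :=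
  cells.filter (fun c =>
    match fd.get? c with
    | some v => vals.contains v
    | none => false)

def func_alt (cells : List Int) (flat : List (Int × Int)) : List (String × List Int) :=
  let fd := PySem.Dict.ofList flat
  [("n", funcPick cells fd [3, 4, 10]),
   ("s", funcPick cells fd [7, 8, 6]),
   ("w", funcPick cells fd [9]),
   ("e", funcPick cells fd [5])]

-- ===== PRECONDITION & SPEC =====
-- Pre_func excludes exactly the inputs where Python A raises KeyError: a cell not a key of flat.
def Pre_func (cells : List Int) (flat : List (Int × Int)) : Prop :=
  ∀ c ∈ cells, (PySem.Dict.ofList flat).contains c = true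
instance (cells : List Int) (flat : List (Int × Int)) : Decidable (Pre_func cells flat) := by
  unfold Pre_func; infer_instance

def pvWitness_func : List Int × (List (Int × Int)) := ([0, 1, 2], [(0, 3), (1, 8), (2, 99)])

def Spec_func (cells : List Int) (flat : List (Int × Int)) (out : List (String × List Int)) : Prop :=
  out = func_alt cells flat
instance (cells : List Int) (flat : List (Int × Int)) (out : List (String × List Int)) :
    Decidable (Spec_func cells flat out) := by unfold Spec_func; infer_instance

-- ===== CLAIM =====
def Claim_equal_func : Prop := ∀ (cells : List Int) (flat : List (Int × Int)),
  Dom_func cells flat → Pre_func cells flat → Spec_func cells flat (func cells flat)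

-- ===== LEMMAS AND PROOFS =====
-- Loop invariant: folding A's step over a four-bucket dict appends, to each bucket,
-- exactly the corresponding filter of the remaining cells.
theorem foldl_stepA_items (fd : PySem.Dict Int Int) (cells : List Int)
    (a b w e : List Int) :
    (cells.foldl (funcStepA fd)
        (PySem.Dict.mk [("n", a), ("s", b), ("w", w), ("e", e)])).items =
      [("n", a ++ funcPick cells fd [3, 4, 10]),
       ("s", b ++ funcPick cells fd [7, 8, 6]),
       ("w", w ++ funcPick cells fd [9]),
       ("e", e ++ funcPick cells fd [5])] := by
  induction cells generalizing a b w e with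
  | nil => simp [funcPick]
  | cons c cs ih =>
    have mN : (PySem.Dict.mk [("n", a), ("s", b), ("w", w), ("e", e)]).modify "n" [] (· ++ [c])
        = PySem.Dict.mk [("n", a ++ [c]), ("s", b), ("w", w), ("e", e)] := by
      simp [PySem.Dict.modify, PySem.Dict.getD, PySem.Dict.get?, PySem.Dict.insert,
        PySem.Dict.contains]
    have mS : (PySem.Dict.mk [("n", a), ("s", b), ("w", w), ("e", e)]).modify "s" [] (· ++ [c])
        = PySem.Dict.mk [("n", a), ("s", b ++ [c]), ("w", w), ("e", e)] := by
      simp [PySem.Dict.modify, PySem.Dict.getD, PySem.Dict.get?, PySem.Dict.insert,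
        PySem.Dict.contains]
    have mW : (PySem.Dict.mk [("n", a), ("s", b), ("w", w), ("e", e)]).modify "w" [] (· ++ [c])
        = PySem.Dict.mk [("n", a), ("s", b), ("w", w ++ [c]), ("e", e)] := by
      simp [PySem.Dict.modify, PySem.Dict.getD, PySem.Dict.get?, PySem.Dict.insert,
        PySem.Dict.contains]
    have mE : (PySem.Dict.mk [("n", a), ("s", b), ("w", w), ("e", e)]).modify "e" [] (· ++ [c])
        = PySem.Dict.mk [("n", a), ("s", b), ("w", w), ("e", e ++ [c])] := by
      simp [PySem.Dict.modify, PySem.Dict.getD, PySem.Dict.get?, PySem.Dict.insert,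
        PySem.Dict.contains]
    simp only [List.foldl_cons]
    cases hv : fd.get? c with
    | none =>
      simp only [funcStepA, hv]
      rw [ih]
      simp [funcPick, hv]
    | some v =>
      simp only [funcStepA, hv]
      by_cases h1 : v = 3 ∨ v = 4 ∨ v = 10
      · rw [if_pos h1, mN, ih]
        rcases h1 with rfl | rfl | rfl <;> simp [funcPick, hv]
      · rw [if_neg h1]
        by_cases h2 : v = 7 ∨ v = 8 ∨ v = 6
        · rw [if_pos h2, mS, ih]
          rcases h2 with rfl | rfl | rfl <;> simp [funcPick, hv]
        · rw [if_neg h2]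
          by_cases h3 : v = 9 ∨ v = 8 ∨ v = 10
          · have hv9 : v = 9 := by rcases h3 with h | h | h <;> simp_all
            rw [if_pos h3, mW, ih]
            subst hv9
            simp [funcPick, hv]
          · rw [if_neg h3]
            by_cases h4 : v = 5 ∨ v = 4 ∨ v = 6
            · have hv5 : v = 5 := by rcases h4 with h | h | h <;> simp_all
              rw [if_pos h4, mE, ih]
              subst hv5
              simp [funcPick, hv]
            · rw [if_neg h4, ih]
              have n3 : v ≠ 3 := fun h => h1 (Or.inl h)
              have n4 : v ≠ 4 := fun h => h1 (Or.inr (Or.inl h))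
              have n10 : v ≠ 10 := fun h => h1 (Or.inr (Or.inr h))
              have n7 : v ≠ 7 := fun h => h2 (Or.inl h)
              have n8 : v ≠ 8 := fun h => h2 (Or.inr (Or.inl h))
              have n6 : v ≠ 6 := fun h => h2 (Or.inr (Or.inr h))
              have n9 : v ≠ 9 := fun h => h3 (Or.inl h)
              have n5 : v ≠ 5 := fun h => h4 (Or.inl h)
              simp [funcPick, hv, n3, n4, n10, n7, n8, n6, n9, n5]

-- ===== VERDICT =====
theorem func_spec : Claim_equal_func := by
  intro cells flat _ _
  unfold Spec_func func func_alt
  have hinit : (((((PySem.Dict.empty).insert "n" ([] : List Int)).insert "s" []).insert "w" []).insert "e" [])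
      = PySem.Dict.mk [("n", []), ("s", []), ("w", []), ("e", [])] := by decide
  rw [hinit, foldl_stepA_items]
  simp
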